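-- pv_equiv track=rewrite | github.com/samodostal/AOC | 2025/10/10.py | solve_diagram_bfs
-- ===== SOURCE A (Python) =====
-- from collections import deque
--
-- def solve_diagram_bfs(target, schematics):
--     target_mask = 0
--     for i, ch in enumerate(target):
--         if ch == "#":
--             target_mask |= 1 << i
--
--     schematic_masks = []
--     for s in schematics:
--         mask = 0
--         for i in s:
--             mask |= 1 << i
--
--         schematic_masks.append(mask)
--
--     queue = deque([(0, 0)])
--     visited = {0}
--
--     while queue:
--         current, presses = queue.popleft()
--
--         if current == target_mask:
--             return presses
--
--         for sm in schematic_masks: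
--             new_state = current ^ sm
--             if new_state not in visited:
--                 visited.add(new_state)
--                 queue.append((new_state, presses + 1))
--
--     return 0
-- ===== SOURCE B (Python) =====
-- def solve_diagram_bfs(target, schematics):
--     target_mask = 0
--     for i, ch in enumerate(target):
--         if ch == "#":
--             target_mask |= 1 << i
--
--     # Dynamic programming over the schematics (no queue, no frontier): dist maps each
--     # XOR of a sub-collection of the schematics seen so far to the minimal number of
--     # presses producing it.  Each press toggles, so an optimal solution uses each
--     # schematic at most once; hence the minimum over sub-collections is the BFS distance.
--     dist = {0: 0}
--     for s in schematics:
--         mask = 0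
--         for i in s:
--             mask |= 1 << i
--         for x, k in list(dist.items()):
--             y = x ^ mask
--             if y not in dist or k + 1 < dist[y]:
--                 dist[y] = k + 1
--     return dist.get(target_mask, 0)
-- ===== Notes on version B (the rewrite author's own statement) =====
-- stated objective: alternative
-- what changed: replaces the breadth-first search over XOR-reachable states (deque, visited set) by dynamic programming over the schematics: a dict mapping each XOR of a sub-collection of the schematics processed so far to the minimal number of presses reaching it, updated once per schematic, with the answer read off by a final lookup; correct because each press toggles, so an optimal press sequence uses each schematic at most once.
import Mathlib
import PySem

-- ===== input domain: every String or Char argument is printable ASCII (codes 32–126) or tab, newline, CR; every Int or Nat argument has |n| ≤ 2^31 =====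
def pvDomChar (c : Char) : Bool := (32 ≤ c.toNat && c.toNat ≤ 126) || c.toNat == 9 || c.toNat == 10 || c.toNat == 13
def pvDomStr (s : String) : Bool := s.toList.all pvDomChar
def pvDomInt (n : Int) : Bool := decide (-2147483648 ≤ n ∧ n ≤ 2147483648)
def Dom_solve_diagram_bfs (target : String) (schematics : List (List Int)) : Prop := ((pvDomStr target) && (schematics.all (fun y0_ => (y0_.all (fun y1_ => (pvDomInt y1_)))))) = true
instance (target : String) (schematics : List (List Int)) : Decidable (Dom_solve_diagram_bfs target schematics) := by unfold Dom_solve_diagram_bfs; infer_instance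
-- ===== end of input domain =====

-- B replaces A's breadth-first search over XOR-reachable states by dynamic programming
-- over the schematics (a dict of minimal press counts per reachable XOR value); same
-- exact results, a different algorithm of similar cost.

-- ===== PORT A =====
-- target_mask: for i, ch in enumerate(target): if ch == "#": target_mask |= 1 << i
def pvTargetMask (target : String) : Int :=
  (PySem.List.enumerate target.toList 0).foldl
    (fun m p => if p.2 = '#' then PySem.Int.bor m ((1 <<< p.1.toNat : Nat) : Int) else m) 0

-- mask = 0; for i in s: mask |= 1 << i   (the inner loop both programs share)
-- (1 << i : Python raises ValueError for i < 0; Pre_ excludes that, i.toNat is exact on 0 ≤ i)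
def pvMaskOf (s : List Int) : Int :=
  s.foldl (fun m i => PySem.Int.bor m ((1 <<< i.toNat : Nat) : Int)) 0

-- schematic_masks = []; for s in schematics: … append
def pvMasks (schematics : List (List Int)) : List Int :=
  schematics.foldl (fun acc s => acc ++ [pvMaskOf s]) []

-- the while-queue loop of A; the fuel 2^(#schematics)+1 bounds the number of pops (every pop
-- beyond the first was enqueued together with a fresh member of visited, and visited never
-- exceeds the 2^(#masks) XOR-reachable states) — proved below, so exhaustion is unreachable
def pvLoopA (T : Int) (masks : List Int) : Nat → List (Int × Int) → PySem.Set Int → Int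
  | 0, _, _ => 0
  | _ + 1, [], _ => 0
  | fa + 1, (c, p) :: q, vis =>
    if c = T then p
    else
      let st := masks.foldl
        (fun (s : List (Int × Int) × PySem.Set Int) sm =>
          let ns := PySem.Int.bxor c sm
          if PySem.Set.contains s.2 ns then s
          else (s.1 ++ [(ns, p + 1)], PySem.Set.add s.2 ns)) (q, vis)
      pvLoopA T masks fa st.1 st.2

def solve_diagram_bfs (target : String) (schematics : List (List Int)) : Int :=
  pvLoopA (pvTargetMask target) (pvMasks schematics) (2 ^ schematics.length + 1)
    [(0, 0)] (PySem.Set.ofList [0])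

-- ===== PORT B =====
-- for x, k in list(dist.items()): y = x ^ mask; if y not in dist or k+1 < dist[y]: dist[y] = k+1
def pvStep (m : Int) (d : PySem.Dict Int Int) : PySem.Dict Int Int :=
  d.items.foldl
    (fun dd xk =>
      match PySem.Dict.get? dd (PySem.Int.bxor xk.1 m) with
      | none => PySem.Dict.insert dd (PySem.Int.bxor xk.1 m) (xk.2 + 1)
      | some v => if xk.2 + 1 < v then PySem.Dict.insert dd (PySem.Int.bxor xk.1 m) (xk.2 + 1) else dd)
    d

-- dist = {0: 0}; for s in schematics: mask = …; <inner items loop>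
def pvDP (schematics : List (List Int)) : PySem.Dict Int Int :=
  schematics.foldl (fun d s => pvStep (pvMaskOf s) d) (PySem.Dict.ofList [(0, 0)])

def solve_diagram_bfs_alt (target : String) (schematics : List (List Int)) : Int :=
  PySem.Dict.getD (pvDP schematics) (pvTargetMask target) 0

-- ===== PRECONDITION & SPEC =====
-- Pre_ excludes exactly the inputs with a negative schematic entry, where Python's 1 << i
-- raises ValueError (in A and in B alike).
def Pre_solve_diagram_bfs (target : String) (schematics : List (List Int)) : Prop :=
  ∀ s ∈ schematics, ∀ i ∈ s, 0 ≤ i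
instance (target : String) (schematics : List (List Int)) : Decidable (Pre_solve_diagram_bfs target schematics) := by unfold Pre_solve_diagram_bfs; infer_instance

def pvWitness_solve_diagram_bfs : String × List (List Int) := ("#.#", [[0], [1], [0, 2]])

def Spec_solve_diagram_bfs (target : String) (schematics : List (List Int)) (out : Int) : Prop := out = solve_diagram_bfs_alt target schematics
instance (target : String) (schematics : List (List Int)) (out : Int) : Decidable (Spec_solve_diagram_bfs target schematics out) := by unfold Spec_solve_diagram_bfs; infer_instance

-- ===== CLAIM (what is proved, stated in full; the proofs are below) =====
def Claim_equal_solve_diagram_bfs : Prop := ∀ (target : String) (schematics : List (List Int)), Dom_solve_diagram_bfs target schematics → Pre_solve_diagram_bfs target schematics → Spec_solve_diagram_bfs target schematics (solve_diagram_bfs target schematics)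

-- ===== LEMMAS AND PROOFS =====

-- ---- XOR algebra for PySem.Int.bxor ----
theorem pvBxor_on (m n : Nat) : PySem.Int.bxor (m : Int) (Int.negSucc n) = Int.negSucc (m ^^^ n) := by
  simp [PySem.Int.bxor, Int.negSucc_eq]; omega

theorem pvBxor_no (m n : Nat) : PySem.Int.bxor (Int.negSucc m) (n : Int) = Int.negSucc (m ^^^ n) := by
  simp [PySem.Int.bxor, Int.negSucc_eq]; omega

theorem pvBxor_nn (m n : Nat) : PySem.Int.bxor (Int.negSucc m) (Int.negSucc n) = ((m ^^^ n : Nat) : Int) := by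
  simp [PySem.Int.bxor, Int.negSucc_eq]; omega

theorem pvBxor_assoc (a b c : Int) :
    PySem.Int.bxor (PySem.Int.bxor a b) c = PySem.Int.bxor a (PySem.Int.bxor b c) := by
  rcases a with m | m <;> rcases b with n | n <;> rcases c with k | k <;>
    simp [Int.ofNat_eq_natCast, pvBxor_on, pvBxor_no, pvBxor_nn, Nat.xor_assoc]

theorem pvBxor_cancel (a u : Int) : PySem.Int.bxor (PySem.Int.bxor a u) a = u := by
  rw [PySem.Int.bxor_comm a u, pvBxor_assoc, PySem.Int.bxor_self, PySem.Int.bxor_zero]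

theorem pvBxor_cancel_right (y m : Int) : PySem.Int.bxor (PySem.Int.bxor y m) m = y := by
  rw [PySem.Int.bxor_comm y m]; exact pvBxor_cancel m y

theorem pvBxor_right_inj {x x' m : Int} (h : PySem.Int.bxor x m = PySem.Int.bxor x' m) : x = x' := by
  have := congrArg (fun z => PySem.Int.bxor z m) h
  simpa [pvBxor_cancel_right] using this

theorem pvBxor_zero_left (a : Int) : PySem.Int.bxor 0 a = a := by
  rw [PySem.Int.bxor_comm]; exact PySem.Int.bxor_zero a

-- ---- XOR of a list, reachability by sequences / by sub-collections ----
def pvXorAll (s : List Int) : Int := s.foldr PySem.Int.bxor 0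

theorem pvXorAll_cons (a : Int) (s : List Int) :
    pvXorAll (a :: s) = PySem.Int.bxor a (pvXorAll s) := rfl

theorem pvXorAll_append (a b : List Int) :
    pvXorAll (a ++ b) = PySem.Int.bxor (pvXorAll a) (pvXorAll b) := by
  induction a with
  | nil => simp [pvXorAll, pvBxor_zero_left]
  | cons x t ih => simp only [List.cons_append, pvXorAll_cons, ih, pvBxor_assoc]

theorem pvXorAll_perm {a b : List Int} (h : a.Perm b) : pvXorAll a = pvXorAll b := by
  induction h with
  | nil => rfl
  | cons x _ ih => simp [pvXorAll_cons, ih]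
  | swap x y l =>
    simp only [pvXorAll_cons, ← pvBxor_assoc]
    rw [PySem.Int.bxor_comm y x]
  | trans _ _ ih1 ih2 => rw [ih1, ih2]

-- y is the XOR of k elements drawn from l (a walk of k presses)
def pvSeqR (l : List Int) (k : Nat) (y : Int) : Prop :=
  ∃ s, (∀ m ∈ s, m ∈ l) ∧ s.length = k ∧ pvXorAll s = y

-- y is the XOR of a sub-collection of l of size k
def pvSubR (l : List Int) (k : Nat) (y : Int) : Prop :=
  ∃ s, s.Sublist l ∧ s.length = k ∧ pvXorAll s = y

theorem pvSubR_seqR {l : List Int} {k : Nat} {y : Int} (h : pvSubR l k y) : pvSeqR l k y := by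
  obtain ⟨s, hs, hl, hx⟩ := h
  exact ⟨s, fun m hm => hs.mem hm, hl, hx⟩

theorem pvSeqR_zero (l : List Int) (y : Int) : pvSeqR l 0 y ↔ y = 0 := by
  constructor
  · rintro ⟨s, _, hl, hx⟩
    rw [List.length_eq_zero_iff] at hl
    subst hl; exact hx.symm
  · rintro rfl; exact ⟨[], by simp, rfl, rfl⟩

-- every walk cancels to a sub-collection of at most the same size
theorem pvCancel {l : List Int} : ∀ (n : Nat) (s : List Int), s.length ≤ n →
    (∀ m ∈ s, m ∈ l) → ∃ t, t.Sublist l ∧ t.length ≤ s.length ∧ pvXorAll t = pvXorAll s := by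
  intro n
  induction n with
  | zero =>
    intro s hn _
    have : s = [] := List.length_eq_zero_iff.mp (Nat.le_zero.mp hn)
    subst this
    exact ⟨[], List.nil_sublist _, le_refl _, rfl⟩
  | succ n ih =>
    intro s hn hmem
    by_cases hnd : s.Nodup
    · obtain ⟨t, hperm, hsub⟩ := (hnd.subperm (fun m hm => hmem m hm) : s.Subperm l)
      exact ⟨t, hsub, le_of_eq hperm.length_eq, pvXorAll_perm hperm⟩
    · have hdup : ∃ x, x ∈ s ∧ x ∈ s.erase x := by
        rw [← List.exists_duplicate_iff_not_nodup] at hnd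
        obtain ⟨x, hx⟩ := hnd
        have h2 : [x, x].Sublist s := List.duplicate_iff_sublist.mp hx
        have hc := h2.count_le x
        simp at hc
        refine ⟨x, List.count_pos_iff.mp (by omega), List.count_pos_iff.mp ?_⟩
        rw [List.count_erase_self]; omega
      obtain ⟨x, hx1, hx2⟩ := hdup
      have hp1 : s.Perm (x :: s.erase x) := List.perm_cons_erase hx1
      have hp2 : (s.erase x).Perm (x :: (s.erase x).erase x) := List.perm_cons_erase hx2
      set t0 := (s.erase x).erase x with ht0
      have hxs : pvXorAll s = pvXorAll t0 := by
        rw [pvXorAll_perm hp1, pvXorAll_cons, pvXorAll_perm hp2, pvXorAll_cons,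
          ← pvBxor_assoc, PySem.Int.bxor_self, pvBxor_zero_left]
      have hlen : t0.length + 2 = s.length := by
        have p1 : 0 < s.length := List.length_pos_of_mem hx1
        have p2 : 0 < (s.erase x).length := List.length_pos_of_mem hx2
        have e1 := List.length_erase_of_mem hx1
        have e2 := List.length_erase_of_mem hx2
        simp only [ht0]
        omega
      have hmem0 : ∀ m ∈ t0, m ∈ l := fun m hm =>
        hmem m (List.mem_of_mem_erase (List.mem_of_mem_erase hm))
      obtain ⟨t, h1, h2, h3⟩ := ih t0 (by omega) hmem0
      exact ⟨t, h1, by omega, h3 ▸ hxs.symm⟩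

theorem pvSeqR_subR {l : List Int} {k : Nat} {y : Int} (h : pvSeqR l k y) :
    ∃ j ≤ k, pvSubR l j y := by
  obtain ⟨s, hmem, hl, hx⟩ := h
  obtain ⟨t, h1, h2, h3⟩ := pvCancel s.length s (le_refl _) hmem
  exact ⟨t.length, by omega, t, h1, rfl, h3.trans hx⟩

-- splitting a walk of length K at K - p
theorem pvSeqR_decompose {l : List Int} {K p : Nat} {y : Int}
    (h : pvSeqR l K y) (hp : p ≤ K) :
    ∃ z, pvSeqR l p z ∧ ∀ j z', pvSeqR l j z' → z' = z → pvSeqR l (K - p + j) y := by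
  obtain ⟨s, hmem, hl, hx⟩ := h
  refine ⟨pvXorAll (s.drop (K - p)), ⟨s.drop (K - p), fun m hm => hmem m (List.mem_of_mem_drop hm), by rw [List.length_drop, hl]; omega, rfl⟩, ?_⟩
  rintro j z' ⟨t, htm, htl, htx⟩ rfl
  refine ⟨s.take (K - p) ++ t, ?_, ?_, ?_⟩
  · intro m hm
    rcases List.mem_append.mp hm with hm | hm
    · exact hmem m (List.mem_of_mem_take hm)
    · exact htm m hm
  · rw [List.length_append, List.length_take, htl, hl]; omega
  · rw [pvXorAll_append, htx, ← pvXorAll_append, List.take_append_drop, hx]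

-- minimal walk length (classical)
theorem pvExistsMinSeq {l : List Int} {y : Int} (h : ∃ k, pvSeqR l k y) :
    ∃ K, pvSeqR l K y ∧ ∀ j < K, ¬ pvSeqR l j y := by
  haveI : DecidablePred (fun k => pvSeqR l k y) := fun _ => Classical.propDecidable _
  exact ⟨Nat.find h, Nat.find_spec h, fun j hj => Nat.find_min h hj⟩

-- ---- sub-collection reachability over l ++ [m] ----
theorem pvSubR_concat {l : List Int} {m : Int} {k : Nat} {y : Int} :
    pvSubR (l ++ [m]) k y ↔ pvSubR l k y ∨ (∃ j, k = j + 1 ∧ pvSubR l j (PySem.Int.bxor y m)) := by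
  constructor
  · rintro ⟨s, hs, hl, hx⟩
    rw [List.sublist_append_iff] at hs
    obtain ⟨a, b, rfl, ha, hb⟩ := hs
    rcases List.sublist_singleton.mp hb with rfl | rfl
    · exact Or.inl ⟨a, ha, by simpa using hl, by simpa using hx⟩
    · refine Or.inr ⟨a.length, by simp at hl; omega, a, ha, rfl, ?_⟩
      rw [← hx, pvXorAll_append]
      show pvXorAll a = PySem.Int.bxor (PySem.Int.bxor (pvXorAll a) (pvXorAll [m])) m
      rw [show pvXorAll [m] = m from by simp [pvXorAll, PySem.Int.bxor_zero],
        pvBxor_cancel_right]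
  · rintro (⟨s, hs, hl, hx⟩ | ⟨j, rfl, s, hs, hl, hx⟩)
    · exact ⟨s, hs.trans (List.sublist_append_left _ _), hl, hx⟩
    · refine ⟨s ++ [m], hs.append (List.Sublist.refl _), by simp [hl], ?_⟩
      rw [pvXorAll_append, hx,
        show pvXorAll [m] = m from by simp [pvXorAll, PySem.Int.bxor_zero],
        pvBxor_cancel_right]

theorem pvSubR_nil {k : Nat} {y : Int} : pvSubR [] k y ↔ k = 0 ∧ y = 0 := by
  constructor
  · rintro ⟨s, hs, hl, hx⟩
    rw [List.sublist_nil] at hs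
    subst hs
    exact ⟨hl.symm, hx.symm⟩
  · rintro ⟨rfl, rfl⟩
    exact ⟨[], List.Sublist.refl _, rfl, rfl⟩

-- spanned = reachable by some sub-collection (used for the fuel bound)
def pvSpanned (masks : List Int) (x : Int) : Prop := ∃ s, s.Sublist masks ∧ pvXorAll s = x

theorem pvSpanned_iff (masks : List Int) (x : Int) :
    pvSpanned masks x ↔ ∃ k, pvSubR masks k x := by
  constructor
  · rintro ⟨s, h1, h2⟩; exact ⟨s.length, s, h1, rfl, h2⟩
  · rintro ⟨k, s, h1, _, h3⟩; exact ⟨s, h1, h3⟩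

theorem pvSpanned_zero (masks : List Int) : pvSpanned masks 0 :=
  ⟨[], List.nil_sublist _, rfl⟩

theorem pvSpanned_mono {masks : List Int} {a x : Int} (h : pvSpanned masks x) :
    pvSpanned (a :: masks) x := by
  obtain ⟨s, hs, he⟩ := h
  exact ⟨s, hs.trans (List.sublist_cons_self a masks), he⟩

theorem pvSpanned_bxor {masks : List Int} {x m : Int}
    (h : pvSpanned masks x) (hm : m ∈ masks) : pvSpanned masks (PySem.Int.bxor x m) := by
  induction masks generalizing x with
  | nil => cases hm
  | cons a ms ih =>
    obtain ⟨s, hs, he⟩ := h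
    rcases List.sublist_cons_iff.mp hs with hsub | ⟨t, rfl, ht⟩
    · rcases List.mem_cons.mp hm with rfl | hm'
      · exact ⟨m :: s, List.cons_sublist_cons.mpr hsub,
          by rw [pvXorAll_cons, PySem.Int.bxor_comm, he]⟩
      · exact pvSpanned_mono (ih ⟨s, hsub, he⟩ hm')
    · rcases List.mem_cons.mp hm with rfl | hm'
      · refine ⟨t, ht.trans (List.sublist_cons_self m ms), ?_⟩
        rw [← he, pvXorAll_cons, pvBxor_cancel]
      · obtain ⟨t', ht', he'⟩ := ih ⟨t, ht, rfl⟩ hm'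
        refine ⟨a :: t', List.cons_sublist_cons.mpr ht', ?_⟩
        rw [pvXorAll_cons, he', ← pvBxor_assoc, ← pvXorAll_cons, he]

theorem pvSpanned_card {masks V : List Int} (hn : V.Nodup)
    (hs : ∀ x ∈ V, pvSpanned masks x) : V.length ≤ 2 ^ masks.length := by
  have hsub : V ⊆ (masks.sublists.map pvXorAll).dedup := by
    intro x hx
    obtain ⟨s, hsl, he⟩ := hs x hx
    exact List.mem_dedup.mpr (List.mem_map.mpr ⟨s, List.mem_sublists.mpr hsl, he⟩)
  calc V.length ≤ (masks.sublists.map pvXorAll).dedup.length := (hn.subperm hsub).length_le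
    _ ≤ (masks.sublists.map pvXorAll).length := (List.dedup_sublist _).length_le
    _ = 2 ^ masks.length := by simp [List.length_sublists]

-- ---- PySem.Set facts ----
theorem pvSet_mem_iff (V : PySem.Set Int) (x : Int) :
    PySem.Set.contains V x = true ↔ x ∈ V := by
  simp [PySem.Set.contains_eq_listContains]

theorem pvSet_add_of_not_contains {V : PySem.Set Int} {x : Int}
    (h : ¬ PySem.Set.contains V x = true) : PySem.Set.add V x = V ++ [x] := by
  have hx : x ∉ V := fun hm => h ((pvSet_mem_iff V x).mpr hm)
  simp [PySem.Set.add, hx]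

-- ---- the level expansion used to analyse A's queue loop ----
def pvExpand (masks : List Int) (st : List Int × PySem.Set Int) (c : Int) : List Int × PySem.Set Int :=
  masks.foldl
    (fun s sm =>
      let ns := PySem.Int.bxor c sm
      if PySem.Set.contains s.2 ns then s
      else (s.1 ++ [ns], PySem.Set.add s.2 ns)) st

-- level-synchronous reading of the BFS, the bridge between A's queue and B's dict
def pvLoopB (T : Int) (masks : List Int) : Nat → List Int → PySem.Set Int → Int → Int
  | 0, _, _, _ => 0
  | _ + 1, [], _, _ => 0
  | fb + 1, f, vis, p =>
    if f.contains T then p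
    else
      let st := f.foldl (pvExpand masks) ([], vis)
      pvLoopB T masks fb st.1 st.2 (p + 1)

theorem pvExpand_nil (c : Int) (acc : List Int) (V : PySem.Set Int) :
    pvExpand [] (acc, V) c = (acc, V) := rfl

theorem pvExpand_cons (c sm : Int) (ms : List Int) (acc : List Int) (V : PySem.Set Int) :
    pvExpand (sm :: ms) (acc, V) c
      = if PySem.Set.contains V (PySem.Int.bxor c sm) = true then pvExpand ms (acc, V) c
        else pvExpand ms (acc ++ [PySem.Int.bxor c sm], PySem.Set.add V (PySem.Int.bxor c sm)) c := by
  by_cases h : PySem.Set.contains V (PySem.Int.bxor c sm) = true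
  · simp only [pvExpand, List.foldl_cons, h, if_pos]
  · simp only [pvExpand, List.foldl_cons]
    rw [if_neg h, if_neg h]

theorem pvExpand_append (masks : List Int) (c : Int) (acc : List Int) (V : PySem.Set Int) :
    pvExpand masks (acc, V) c
      = (acc ++ (pvExpand masks ([], V) c).1, (pvExpand masks ([], V) c).2) := by
  induction masks generalizing acc V with
  | nil => simp [pvExpand_nil]
  | cons sm ms ih =>
    rw [pvExpand_cons, pvExpand_cons]
    by_cases h : PySem.Set.contains V (PySem.Int.bxor c sm) = true
    · rw [if_pos h, if_pos h]
      exact ih acc V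
    · rw [if_neg h, if_neg h, List.nil_append,
        ih (acc ++ [PySem.Int.bxor c sm]), ih [PySem.Int.bxor c sm]]
      simp

theorem pvExpandAll_append (masks : List Int) (f : List Int) (acc : List Int) (V : PySem.Set Int) :
    f.foldl (pvExpand masks) (acc, V)
      = (acc ++ (f.foldl (pvExpand masks) ([], V)).1, (f.foldl (pvExpand masks) ([], V)).2) := by
  induction f generalizing acc V with
  | nil => simp
  | cons c f ih =>
    simp only [List.foldl_cons]
    rw [pvExpand_append]
    rcases hE : pvExpand masks ([], V) c with ⟨d₁, V₁⟩
    rw [ih (acc ++ d₁) V₁, ih d₁ V₁]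
    simp

-- visited after one expansion = old visited ++ the fresh states (no hypotheses needed)
theorem pvExpand_snd (masks : List Int) (c : Int) (V : PySem.Set Int) :
    (pvExpand masks ([], V) c).2 = V ++ (pvExpand masks ([], V) c).1 := by
  induction masks generalizing V with
  | nil => simp [pvExpand_nil]
  | cons sm ms ih =>
    rw [pvExpand_cons]
    by_cases h : PySem.Set.contains V (PySem.Int.bxor c sm) = true
    · rw [if_pos h]; exact ih V
    · rw [if_neg h, List.nil_append, pvSet_add_of_not_contains h,
        pvExpand_append ms c [PySem.Int.bxor c sm] (V ++ [PySem.Int.bxor c sm]), ih]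
      simp

theorem pvExpandAll_snd (masks : List Int) (f : List Int) (V : PySem.Set Int) :
    (f.foldl (pvExpand masks) ([], V)).2 = V ++ (f.foldl (pvExpand masks) ([], V)).1 := by
  induction f generalizing V with
  | nil => simp
  | cons c f ih =>
    simp only [List.foldl_cons]
    rcases hE : pvExpand masks ([], V) c with ⟨d₁, V₁⟩
    have h1 : V₁ = V ++ d₁ := by
      have := pvExpand_snd masks c V
      rw [hE] at this; simpa using this
    rw [pvExpandAll_append masks f d₁ V₁, ih V₁, h1]
    simp

-- membership in the fresh states of one node's expansion
theorem pvExpand_mem (masks : List Int) (c : Int) (V : PySem.Set Int) (x : Int) :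
    x ∈ (pvExpand masks ([], V) c).1 ↔ (∃ m ∈ masks, x = PySem.Int.bxor c m) ∧ x ∉ V := by
  induction masks generalizing V with
  | nil => simp [pvExpand_nil]
  | cons sm ms ih =>
    rw [pvExpand_cons]
    by_cases h : PySem.Set.contains V (PySem.Int.bxor c sm) = true
    · rw [if_pos h, ih]
      have hin : PySem.Int.bxor c sm ∈ V := (pvSet_mem_iff V _).mp h
      constructor
      · rintro ⟨⟨m, hm, rfl⟩, hv⟩
        exact ⟨⟨m, List.mem_cons_of_mem _ hm, rfl⟩, hv⟩
      · rintro ⟨⟨m, hm, rfl⟩, hv⟩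
        rcases List.mem_cons.mp hm with rfl | hm'
        · exact absurd hin hv
        · exact ⟨⟨m, hm', rfl⟩, hv⟩
    · rw [if_neg h, List.nil_append,
        pvExpand_append ms c [PySem.Int.bxor c sm] (PySem.Set.add V (PySem.Int.bxor c sm)), pvSet_add_of_not_contains h]
      have hnv : PySem.Int.bxor c sm ∉ V := fun hm => h ((pvSet_mem_iff V _).mpr hm)
      simp only [List.mem_append, List.mem_singleton, ih]
      constructor
      · rintro (rfl | ⟨⟨m, hm, rfl⟩, hv⟩)
        · exact ⟨⟨sm, List.mem_cons_self, rfl⟩, hnv⟩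
        · push_neg at hv
          exact ⟨⟨m, List.mem_cons_of_mem _ hm, rfl⟩, hv.1⟩
      · rintro ⟨⟨m, hm, rfl⟩, hv⟩
        by_cases he : PySem.Int.bxor c m = PySem.Int.bxor c sm
        · exact Or.inl he
        · rcases List.mem_cons.mp hm with rfl | hm'
          · exact Or.inl rfl
          · refine Or.inr ⟨⟨m, hm', rfl⟩, ?_⟩
            push_neg
            exact ⟨hv, he⟩

-- membership in the fresh states of a whole level's expansion
theorem pvExpandAll_mem (masks : List Int) (f : List Int) (V : PySem.Set Int) (x : Int) :
    x ∈ (f.foldl (pvExpand masks) ([], V)).1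
      ↔ (∃ c ∈ f, ∃ m ∈ masks, x = PySem.Int.bxor c m) ∧ x ∉ V := by
  induction f generalizing V with
  | nil => simp
  | cons c f ih =>
    simp only [List.foldl_cons]
    rcases hE : pvExpand masks ([], V) c with ⟨d₁, V₁⟩
    have h1 : V₁ = V ++ d₁ := by
      have := pvExpand_snd masks c V
      rw [hE] at this; simpa using this
    have hd : ∀ z, z ∈ d₁ ↔ (∃ m ∈ masks, z = PySem.Int.bxor c m) ∧ z ∉ V := by
      intro z
      have := pvExpand_mem masks c V z
      rw [hE] at this; simpa using this
    rw [pvExpandAll_append masks f d₁ V₁]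
    simp only [List.mem_append, ih, h1]
    constructor
    · rintro (hz | ⟨⟨c', hc', m, hm, rfl⟩, hv⟩)
      · obtain ⟨⟨m, hm, rfl⟩, hv⟩ := (hd x).mp hz
        exact ⟨⟨c, List.mem_cons_self, m, hm, rfl⟩, hv⟩
      · push_neg at hv
        exact ⟨⟨c', List.mem_cons_of_mem _ hc', m, hm, rfl⟩, hv.1⟩
    · rintro ⟨⟨c', hc', m, hm, rfl⟩, hv⟩
      by_cases hz : PySem.Int.bxor c' m ∈ d₁
      · exact Or.inl hz
      · rcases List.mem_cons.mp hc' with rfl | hc''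
        · exact absurd ((hd _).mpr ⟨⟨m, hm, rfl⟩, hv⟩) hz
        · refine Or.inr ⟨⟨c', hc'', m, hm, rfl⟩, ?_⟩
          push_neg
          exact ⟨hv, hz⟩

-- nodup of visited is preserved through a level (restated from the expansion equations)
theorem pvExpand_parts_aux (masks : List Int) (c : Int) (hc : pvSpanned masks c) :
    ∀ (M : List Int), (∀ m ∈ M, m ∈ masks) → ∀ (V : PySem.Set Int), V.Nodup →
    (∀ x ∈ V, pvSpanned masks x) →
    (V ++ (pvExpand M ([], V) c).1).Nodup
    ∧ (∀ x ∈ (pvExpand M ([], V) c).1, pvSpanned masks x) := by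
  intro M
  induction M with
  | nil => intro _ V hN hS; rw [pvExpand_nil]; exact ⟨by simpa using hN, by simp⟩
  | cons sm ms ih =>
    intro hM V hN hS
    have hsm : sm ∈ masks := hM sm (List.mem_cons_self)
    have hM' : ∀ m ∈ ms, m ∈ masks := fun m hm => hM m (List.mem_cons_of_mem _ hm)
    rw [pvExpand_cons]
    by_cases h : PySem.Set.contains V (PySem.Int.bxor c sm) = true
    · rw [if_pos h]
      exact ih hM' V hN hS
    · rw [if_neg h, List.nil_append]
      have hmem : PySem.Int.bxor c sm ∉ V := fun hx => h ((pvSet_mem_iff V _).mpr hx)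
      rw [pvSet_add_of_not_contains h]
      have hspan : pvSpanned masks (PySem.Int.bxor c sm) := pvSpanned_bxor hc hsm
      have hN' : (V ++ [PySem.Int.bxor c sm]).Nodup := by
        rw [List.nodup_append]
        refine ⟨hN, List.nodup_singleton _, ?_⟩
        intro a ha b hb
        rw [List.mem_singleton] at hb
        subst hb
        exact fun hab => hmem (hab ▸ ha)
      have hS' : ∀ x ∈ V ++ [PySem.Int.bxor c sm], pvSpanned masks x := by
        intro x hx
        rcases List.mem_append.mp hx with hx | hx
        · exact hS x hx
        · rcases List.mem_singleton.mp hx with rfl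
          exact hspan
      obtain ⟨h2, h3⟩ := ih hM' (V ++ [PySem.Int.bxor c sm]) hN' hS'
      rw [pvExpand_append ms c [PySem.Int.bxor c sm] (V ++ [PySem.Int.bxor c sm])]
      refine ⟨by simpa using h2, ?_⟩
      intro x hx
      rcases List.mem_append.mp hx with hx | hx
      · rcases List.mem_singleton.mp hx with rfl
        exact hspan
      · exact h3 x hx

theorem pvExpand_parts (masks : List Int) (c : Int) (V : PySem.Set Int)
    (hN : V.Nodup) (hS : ∀ x ∈ V, pvSpanned masks x) (hc : pvSpanned masks c) :
    (V ++ (pvExpand masks ([], V) c).1).Nodup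
    ∧ (∀ x ∈ (pvExpand masks ([], V) c).1, pvSpanned masks x) :=
  pvExpand_parts_aux masks c hc masks (fun _ hm => hm) V hN hS

theorem pvExpandAll_parts (masks : List Int) (f : List Int) (V : PySem.Set Int)
    (hN : V.Nodup) (hS : ∀ x ∈ V, pvSpanned masks x) (hf : ∀ c ∈ f, pvSpanned masks c) :
    (V ++ (f.foldl (pvExpand masks) ([], V)).1).Nodup
    ∧ (∀ x ∈ (f.foldl (pvExpand masks) ([], V)).1, pvSpanned masks x) := by
  induction f generalizing V with
  | nil => exact ⟨by simpa using hN, by simp⟩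
  | cons c f ih =>
    obtain ⟨h2, h3⟩ := pvExpand_parts masks c V hN hS (hf c List.mem_cons_self)
    simp only [List.foldl_cons]
    rcases hE : pvExpand masks ([], V) c with ⟨d₁, V₁⟩
    have h1 : V₁ = V ++ d₁ := by
      have := pvExpand_snd masks c V
      rw [hE] at this; simpa using this
    rw [hE] at h2 h3
    simp only at h2 h3
    subst h1
    obtain ⟨g2, g3⟩ := ih (V ++ d₁) h2
      (by intro x hx
          rcases List.mem_append.mp hx with hx | hx
          · exact hS x hx
          · exact h3 x hx)
      (fun c' hc' => hf c' (List.mem_cons_of_mem _ hc'))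
    rw [pvExpandAll_append masks f d₁ (V ++ d₁)]
    refine ⟨by simpa using g2, ?_⟩
    intro x hx
    rcases List.mem_append.mp hx with hx | hx
    · exact h3 x hx
    · exact g3 x hx

-- ---- A's inner fold produces exactly the pvExpand result, tagged with presses p+1 ----
theorem pvAfold_eq (masks : List Int) (c : Int) (p : Int) (q : List (Int × Int)) (V : PySem.Set Int) :
    masks.foldl
      (fun (s : List (Int × Int) × PySem.Set Int) sm =>
        let ns := PySem.Int.bxor c sm
        if PySem.Set.contains s.2 ns then s
        else (s.1 ++ [(ns, p + 1)], PySem.Set.add s.2 ns)) (q, V)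
    = (q ++ (pvExpand masks ([], V) c).1.map (fun s => (s, p + 1)), (pvExpand masks ([], V) c).2) := by
  induction masks generalizing q V with
  | nil => simp [pvExpand_nil]
  | cons sm ms ih =>
    simp only [List.foldl_cons]
    rw [pvExpand_cons]
    by_cases h : PySem.Set.contains V (PySem.Int.bxor c sm) = true
    · rw [if_pos h, if_pos h]
      exact ih q V
    · rw [if_neg h, if_neg h, List.nil_append,
        ih (q ++ [(PySem.Int.bxor c sm, p + 1)]) (PySem.Set.add V (PySem.Int.bxor c sm)),
        pvExpand_append ms c [PySem.Int.bxor c sm] (PySem.Set.add V (PySem.Int.bxor c sm))]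
      simp

theorem pvLoopA_nil (T : Int) (masks : List Int) (fa : Nat) (V : PySem.Set Int) :
    pvLoopA T masks fa [] V = 0 := by
  cases fa <;> rfl

theorem pvLoopB_nil (T : Int) (masks : List Int) (fb : Nat) (V : PySem.Set Int) (p : Int) :
    pvLoopB T masks fb [] V p = 0 := by
  cases fb <;> rfl

-- ---- A processes one whole level ----
theorem pvLoopA_level (T : Int) (masks : List Int) (p : Int) :
    ∀ (f n : List Int) (V : PySem.Set Int) (fa : Nat), f.length ≤ fa → (∀ c ∈ f, c ≠ T) →
    pvLoopA T masks fa (f.map (fun c => (c, p)) ++ n.map (fun c => (c, p + 1))) V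
      = pvLoopA T masks (fa - f.length)
          ((n ++ (f.foldl (pvExpand masks) ([], V)).1).map (fun c => (c, p + 1)))
          (f.foldl (pvExpand masks) ([], V)).2 := by
  intro f
  induction f with
  | nil => intro n V fa _ _; simp
  | cons c f ih =>
    intro n V fa hlen hne
    rcases fa with _ | fa
    · simp at hlen
    simp only [List.map_cons, List.cons_append, pvLoopA]
    rw [if_neg (hne c List.mem_cons_self)]
    rw [pvAfold_eq masks c p (f.map (fun c => (c, p)) ++ n.map (fun c => (c, p + 1))) V]
    rcases hE : pvExpand masks ([], V) c with ⟨d₁, V₁⟩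
    simp only
    have hq : f.map (fun c => (c, p)) ++ n.map (fun c => (c, p + 1)) ++ d₁.map (fun s => (s, p + 1))
        = f.map (fun c => (c, p)) ++ (n ++ d₁).map (fun c => (c, p + 1)) := by
      simp
    rw [hq, ih (n ++ d₁) V₁ fa (Nat.succ_le_succ_iff.mp hlen) (fun c hc => hne c (List.mem_cons_of_mem _ hc))]
    simp only [List.foldl_cons, hE]
    rw [pvExpandAll_append masks f d₁ V₁]
    simp [Nat.succ_sub_succ]

theorem pvLoopA_found (T : Int) (masks : List Int) (p : Int) :
    ∀ (f n : List Int) (V : PySem.Set Int) (fa : Nat), f.length ≤ fa → T ∈ f →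
    pvLoopA T masks fa (f.map (fun c => (c, p)) ++ n.map (fun c => (c, p + 1))) V = p := by
  intro f
  induction f with
  | nil => intro n V fa _ h; cases h
  | cons c f ih =>
    intro n V fa hlen hT
    rcases fa with _ | fa
    · simp at hlen
    simp only [List.map_cons, List.cons_append, pvLoopA]
    by_cases hc : c = T
    · rw [if_pos hc]
    rw [if_neg hc]
    rw [pvAfold_eq masks c p (f.map (fun c => (c, p)) ++ n.map (fun c => (c, p + 1))) V]
    rcases hE : pvExpand masks ([], V) c with ⟨d₁, V₁⟩
    simp only
    have hq : f.map (fun c => (c, p)) ++ n.map (fun c => (c, p + 1)) ++ d₁.map (fun s => (s, p + 1))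
        = f.map (fun c => (c, p)) ++ (n ++ d₁).map (fun c => (c, p + 1)) := by
      simp
    rw [hq]
    have hT' : T ∈ f := by
      rcases List.mem_cons.mp hT with rfl | h
      · exact absurd rfl hc
      · exact h
    exact ih (n ++ d₁) V₁ fa (Nat.succ_le_succ_iff.mp hlen) hT'

-- ---- the main simulation: queue BFS = level BFS, under the shared fuel potential ----
theorem pvMain (T : Int) (masks : List Int) :
    ∀ (fb fa : Nat) (f : List Int) (V : PySem.Set Int) (p : Int),
    V.Nodup → (∀ x ∈ V, pvSpanned masks x) → (∀ c ∈ f, pvSpanned masks c) →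
    2 ^ masks.length + 1 + f.length ≤ fa + V.length →
    2 ^ masks.length + 1 + f.length ≤ fb + V.length →
    pvLoopA T masks fa (f.map (fun c => (c, p))) V = pvLoopB T masks fb f V p := by
  intro fb
  induction fb with
  | zero =>
    intro fa f V p hN hS _ _ hfb
    have := pvSpanned_card hN hS
    omega
  | succ fb ih =>
    intro fa f V p hN hS hf hfa hfb
    rcases f with _ | ⟨c₀, f₀⟩
    · simp [pvLoopA_nil, pvLoopB_nil]
    have hcard := pvSpanned_card hN hS
    have hlen : (c₀ :: f₀).length ≤ fa := by omega
    show _ = pvLoopB T masks (fb + 1) (c₀ :: f₀) V p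
    simp only [pvLoopB]
    by_cases hT : T ∈ c₀ :: f₀
    · rw [if_pos (by simpa using hT)]
      have := pvLoopA_found T masks p (c₀ :: f₀) [] V fa hlen hT
      simpa using this
    · rw [if_neg (by simpa using hT)]
      have hne : ∀ c ∈ c₀ :: f₀, c ≠ T := by
        intro c hc rfl; exact hT hc
      have hlevel := pvLoopA_level T masks p (c₀ :: f₀) [] V fa hlen hne
      simp only [List.map_nil, List.nil_append, List.append_nil] at hlevel
      rw [hlevel]
      obtain ⟨h2, h3⟩ := pvExpandAll_parts masks (c₀ :: f₀) V hN hS hf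
      have h1 := pvExpandAll_snd masks (c₀ :: f₀) V
      refine ih (fa - (c₀ :: f₀).length) ((c₀ :: f₀).foldl (pvExpand masks) ([], V)).1
        ((c₀ :: f₀).foldl (pvExpand masks) ([], V)).2 (p + 1) ?_ ?_ h3 ?_ ?_
      · rw [h1]; exact h2
      · intro x hx
        rw [h1] at hx
        rcases List.mem_append.mp hx with hx | hx
        · exact hS x hx
        · exact h3 x hx
      · rw [h1]
        simp only [List.length_append]
        omega
      · rw [h1]
        simp only [List.length_append]
        have : 1 ≤ (c₀ :: f₀).length := by simp
        omega

theorem pvMasks_eq_map (schematics : List (List Int)) :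
    pvMasks schematics = schematics.map pvMaskOf := by
  unfold pvMasks
  exact PySem.List.foldl_append_singleton_eq_map pvMaskOf schematics []

-- ---- walks of length k+1 step through a neighbour ----
theorem pvSeqR_cons_mask {masks : List Int} {k : Nat} {c m : Int}
    (hc : pvSeqR masks k c) (hm : m ∈ masks) : pvSeqR masks (k + 1) (PySem.Int.bxor c m) := by
  obtain ⟨s, hmem, hl, hx⟩ := hc
  refine ⟨m :: s, ?_, by simp [hl], ?_⟩
  · intro a ha
    rcases List.mem_cons.mp ha with rfl | ha
    · exact hm
    · exact hmem a ha
  · rw [pvXorAll_cons, hx, PySem.Int.bxor_comm]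

theorem pvSeqR_succ_decomp {masks : List Int} {k : Nat} {x : Int}
    (h : pvSeqR masks (k + 1) x) :
    ∃ m ∈ masks, ∃ c, pvSeqR masks k c ∧ x = PySem.Int.bxor c m := by
  obtain ⟨s, hmem, hl, hx⟩ := h
  rcases s with _ | ⟨m, t⟩
  · simp at hl
  · refine ⟨m, hmem m List.mem_cons_self, pvXorAll t,
      ⟨t, fun a ha => hmem a (List.mem_cons_of_mem _ ha), by simpa using hl, rfl⟩, ?_⟩
    rw [← hx, pvXorAll_cons, PySem.Int.bxor_comm]

-- a state at distance exactly p+1 is one press away from a state at distance exactly p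
theorem pvExactStep {masks : List Int} {p : Nat} {x : Int}
    (hx : pvSeqR masks (p + 1) x) (hmin : ∀ k < p + 1, ¬ pvSeqR masks k x) :
    ∃ c, (pvSeqR masks p c ∧ ∀ k < p, ¬ pvSeqR masks k c) ∧ ∃ m ∈ masks, x = PySem.Int.bxor c m := by
  obtain ⟨m, hm, c, hc, rfl⟩ := pvSeqR_succ_decomp hx
  obtain ⟨Kc, hKc, hKcmin⟩ := pvExistsMinSeq ⟨p, hc⟩
  have hle : Kc ≤ p := by
    by_contra hgt
    exact hKcmin p (by omega) hc
  rcases Nat.lt_or_ge Kc p with hlt | hge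
  · exact absurd (pvSeqR_cons_mask hKc hm) (hmin (Kc + 1) (by omega))
  · have : Kc = p := by omega
    subst this
    exact ⟨c, ⟨hKc, hKcmin⟩, m, hm, rfl⟩

-- ---- correctness of the level-synchronous reading of the BFS ----
theorem pvLoopB_correct (T : Int) (masks : List Int) :
    ∀ (fb : Nat) (f : List Int) (V : PySem.Set Int) (p : Nat),
    (∀ x, x ∈ V ↔ ∃ k ≤ p, pvSeqR masks k x) →
    (∀ x, x ∈ f ↔ (pvSeqR masks p x ∧ ∀ k < p, ¬ pvSeqR masks k x)) →
    (∀ k < p, ¬ pvSeqR masks k T) →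
    V.Nodup →
    2 ^ masks.length + 1 + f.length ≤ fb + V.length →
    ((∀ k, ¬ pvSeqR masks k T) → pvLoopB T masks fb f V (p : Int) = 0)
    ∧ (∀ K : Nat, pvSeqR masks K T → (∀ j < K, ¬ pvSeqR masks j T) →
        pvLoopB T masks fb f V (p : Int) = (K : Int)) := by
  intro fb
  induction fb with
  | zero =>
    intro f V p hV hF hT hN hfuel
    have hSpV : ∀ x ∈ V, pvSpanned masks x := by
      intro x hx
      obtain ⟨k, _, hs⟩ := (hV x).mp hx
      obtain ⟨j, _, hsub⟩ := pvSeqR_subR hs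
      exact (pvSpanned_iff masks x).mpr ⟨j, hsub⟩
    have := pvSpanned_card hN hSpV
    omega
  | succ fb ih =>
    intro f V p hV hF hT hN hfuel
    have hSpV : ∀ x ∈ V, pvSpanned masks x := by
      intro x hx
      obtain ⟨k, _, hs⟩ := (hV x).mp hx
      obtain ⟨j, _, hsub⟩ := pvSeqR_subR hs
      exact (pvSpanned_iff masks x).mpr ⟨j, hsub⟩
    rcases f with _ | ⟨c₀, f₀⟩
    · -- frontier empty: the whole reachable space has been exhausted below level p
      rw [pvLoopB_nil]
      have hnone : ∀ K : Nat, pvSeqR masks K T → (∀ j < K, ¬ pvSeqR masks j T) → False := by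
        intro K hK hKmin
        have hp : p ≤ K := by
          by_contra hgt
          exact hT K (by omega) hK
        obtain ⟨z, hz, hrep⟩ := pvSeqR_decompose hK hp
        obtain ⟨Kz, hKz, hKzmin⟩ := pvExistsMinSeq ⟨p, hz⟩
        have hle : Kz ≤ p := by
          by_contra hgt
          exact hKzmin p (by omega) hz
        rcases Nat.lt_or_ge Kz p with hlt | hge
        · have := hrep Kz z hKz rfl
          exact hKmin (K - p + Kz) (by omega) this
        · have hKzp : Kz = p := by omega
          subst hKzp
          exact absurd ((hF z).mpr ⟨hKz, hKzmin⟩) (by simp)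
      exact ⟨fun _ => rfl, fun K hK hKmin => absurd (hnone K hK hKmin) (fun h => h)⟩
    · have hSpf : ∀ c ∈ c₀ :: f₀, pvSpanned masks c := by
        intro c hc
        obtain ⟨hs, _⟩ := (hF c).mp hc
        obtain ⟨j, _, hsub⟩ := pvSeqR_subR hs
        exact (pvSpanned_iff masks c).mpr ⟨j, hsub⟩
      simp only [pvLoopB]
      by_cases hTf : T ∈ c₀ :: f₀
      · rw [if_pos (by simpa using hTf)]
        obtain ⟨hpT, hpTmin⟩ := (hF T).mp hTf
        constructor
        · intro hUn
          exact absurd hpT (hUn p)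
        · intro K hK hKmin
          have h1 : K ≤ p := by
            by_contra hgt
            exact hKmin p (by omega) hpT
          have h2 : p ≤ K := by
            by_contra hgt
            exact hT K (by omega) hK
          have : K = p := by omega
          subst this
          rfl
      · rw [if_neg (by simpa using hTf)]
        set F1 := (c₀ :: f₀).foldl (pvExpand masks) ([], V) with hF1
        have hsnd : F1.2 = V ++ F1.1 := pvExpandAll_snd masks (c₀ :: f₀) V
        have hmem : ∀ x, x ∈ F1.1 ↔ (∃ c ∈ c₀ :: f₀, ∃ m ∈ masks, x = PySem.Int.bxor c m) ∧ x ∉ V :=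
          fun x => pvExpandAll_mem masks (c₀ :: f₀) V x
        have hparts := pvExpandAll_parts masks (c₀ :: f₀) V hN hSpV hSpf
        -- a state at distance exactly p+1 is generated by the expansion
        have hgen : ∀ x, (pvSeqR masks (p + 1) x ∧ ∀ k < p + 1, ¬ pvSeqR masks k x) →
            (∃ c ∈ c₀ :: f₀, ∃ m ∈ masks, x = PySem.Int.bxor c m) ∧ x ∉ V := by
          intro x ⟨hx, hmin⟩
          obtain ⟨c, hcE, m, hm, rfl⟩ := pvExactStep hx hmin
          refine ⟨⟨c, (hF c).mpr hcE, m, hm, rfl⟩, ?_⟩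
          intro hxV
          obtain ⟨k, hk, hs⟩ := (hV _).mp hxV
          exact hmin k (by omega) hs
        -- and conversely every generated fresh state is at distance exactly p+1
        have hfresh : ∀ x, x ∈ F1.1 → pvSeqR masks (p + 1) x ∧ ∀ k < p + 1, ¬ pvSeqR masks k x := by
          intro x hx
          obtain ⟨⟨c, hc, m, hm, rfl⟩, hnv⟩ := (hmem x).mp hx
          obtain ⟨hcp, _⟩ := (hF c).mp hc
          refine ⟨pvSeqR_cons_mask hcp hm, ?_⟩
          intro k hk hs
          exact hnv ((hV _).mpr ⟨k, by omega, hs⟩)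
        have hV' : ∀ x, x ∈ F1.2 ↔ ∃ k ≤ p + 1, pvSeqR masks k x := by
          intro x
          rw [hsnd, List.mem_append]
          constructor
          · rintro (hx | hx)
            · obtain ⟨k, hk, hs⟩ := (hV x).mp hx
              exact ⟨k, by omega, hs⟩
            · exact ⟨p + 1, le_refl _, (hfresh x hx).1⟩
          · rintro ⟨k, hk, hs⟩
            by_cases hxV : x ∈ V
            · exact Or.inl hxV
            · -- x has a walk of length k ≤ p+1 but none of length ≤ p; so k = p+1
              have hnot : ∀ j ≤ p, ¬ pvSeqR masks j x := by
                intro j hj hs'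
                exact hxV ((hV x).mpr ⟨j, hj, hs'⟩)
              have hk1 : k = p + 1 := by
                rcases Nat.lt_or_ge k (p + 1) with hlt | _
                · exact absurd hs (hnot k (by omega))
                · omega
              exact Or.inr ((hmem x).mpr (hgen x
                ⟨hk1 ▸ hs, fun j hj hs' => hnot j (by omega) hs'⟩))
        have hF' : ∀ x, x ∈ F1.1 ↔ (pvSeqR masks (p + 1) x ∧ ∀ k < p + 1, ¬ pvSeqR masks k x) :=
          fun x => ⟨hfresh x, fun h => (hmem x).mpr (hgen x h)⟩
        have hT' : ∀ k < p + 1, ¬ pvSeqR masks k T := by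
          intro k hk hs
          rcases Nat.lt_or_ge k p with hlt | hge
          · exact hT k hlt hs
          · have hkp : k = p := by omega
            subst hkp
            obtain ⟨K, hK, hKmin⟩ := pvExistsMinSeq ⟨k, hs⟩
            have hle : K ≤ k := by
              by_contra hgt
              exact hKmin k (by omega) hs
            rcases Nat.lt_or_ge K k with hlt | hge'
            · exact hT K hlt hK
            · have : K = k := by omega
              subst this
              exact hTf ((hF T).mpr ⟨hK, hKmin⟩)
        have hN' : F1.2.Nodup := by rw [hsnd]; exact hparts.1
        have hfuel' : 2 ^ masks.length + 1 + F1.1.length ≤ fb + F1.2.length := by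
          rw [hsnd]
          simp only [List.length_append]
          have : 1 ≤ (c₀ :: f₀).length := by simp
          simp only [List.length_cons] at hfuel
          omega
        obtain ⟨C1, C2⟩ := ih F1.1 F1.2 (p + 1) hV' hF' hT' hN' hfuel'
        have hcast : ((p : Int) + 1) = ((p + 1 : Nat) : Int) := by push_cast; ring
        rw [hcast]
        exact ⟨C1, C2⟩

-- ---- B's dict update step, analysed key by key ----
def pvStepF (m : Int) (dd : PySem.Dict Int Int) (xk : Int × Int) : PySem.Dict Int Int :=
  match PySem.Dict.get? dd (PySem.Int.bxor xk.1 m) with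
  | none => PySem.Dict.insert dd (PySem.Int.bxor xk.1 m) (xk.2 + 1)
  | some v => if xk.2 + 1 < v then PySem.Dict.insert dd (PySem.Int.bxor xk.1 m) (xk.2 + 1) else dd

theorem pvStep_eq_foldF (m : Int) (d : PySem.Dict Int Int) :
    pvStep m d = d.items.foldl (pvStepF m) d := rfl

theorem pvStepF_nodup (m : Int) :
    ∀ (L : List (Int × Int)) (dd : PySem.Dict Int Int), dd.keys.Nodup →
      (L.foldl (pvStepF m) dd).keys.Nodup := by
  intro L
  induction L with
  | nil => intro dd h; exact h
  | cons q t ih =>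
    intro dd h
    simp only [List.foldl_cons]
    apply ih
    unfold pvStepF
    rcases dd.get? (PySem.Int.bxor q.1 m) with _ | v
    · exact PySem.Dict.nodup_keys_insert dd _ _ h
    · by_cases hlt : q.2 + 1 < v
      · simp only [if_pos hlt]
        exact PySem.Dict.nodup_keys_insert dd _ _ h
      · simpa only [if_neg hlt]

theorem pvStepF_get?_untouched (m : Int) :
    ∀ (L : List (Int × Int)) (dd : PySem.Dict Int Int) (z : Int),
      (∀ q ∈ L, PySem.Int.bxor q.1 m ≠ z) →
      (L.foldl (pvStepF m) dd).get? z = dd.get? z := by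
  intro L
  induction L with
  | nil => intro dd z _; rfl
  | cons q t ih =>
    intro dd z h
    simp only [List.foldl_cons]
    rw [ih _ z (fun q' hq' => h q' (List.mem_cons_of_mem _ hq'))]
    have hne : z ≠ PySem.Int.bxor q.1 m := (h q List.mem_cons_self).symm
    unfold pvStepF
    rcases dd.get? (PySem.Int.bxor q.1 m) with _ | v
    · exact PySem.Dict.get?_insert_of_ne dd _ hne
    · by_cases hlt : q.2 + 1 < v
      · simp only [if_pos hlt]
        exact PySem.Dict.get?_insert_of_ne dd _ hne
      · simp only [if_neg hlt]

theorem pvStepF_get?_touched (m : Int) :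
    ∀ (L : List (Int × Int)) (dd : PySem.Dict Int Int) (x w : Int),
      (L.map Prod.fst).Nodup → (x, w) ∈ L →
      (L.foldl (pvStepF m) dd).get? (PySem.Int.bxor x m)
        = some (match dd.get? (PySem.Int.bxor x m) with
                | none => w + 1
                | some v => if w + 1 < v then w + 1 else v) := by
  intro L
  induction L with
  | nil => intro dd x w _ h; cases h
  | cons q t ih =>
    intro dd x w hnd hmem
    have hnd' : (t.map Prod.fst).Nodup := (List.nodup_cons.mp hnd).2
    have hq1 : q.1 ∉ t.map Prod.fst := (List.nodup_cons.mp hnd).1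
    simp only [List.foldl_cons]
    rcases List.mem_cons.mp hmem with heq | hmem'
    · -- the head pair is the unique one that touches the key bxor x m
      have hx : q.1 = x := by rw [← heq]
      have hw : q.2 = w := by rw [← heq]
      have huntouched : ∀ q' ∈ t, PySem.Int.bxor q'.1 m ≠ PySem.Int.bxor x m := by
        intro q' hq' habs
        have : q'.1 = x := pvBxor_right_inj habs
        exact hq1 (hx ▸ this ▸ List.mem_map_of_mem hq')
      rw [pvStepF_get?_untouched m t _ _ huntouched]
      unfold pvStepF
      rw [hx, hw]
      rcases hg : dd.get? (PySem.Int.bxor x m) with _ | v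
      · simp [PySem.Dict.get?_insert_self]
      · by_cases hlt : w + 1 < v
        · simp only [if_pos hlt, PySem.Dict.get?_insert_self]
        · simp only [if_neg hlt, hg]
    · -- the head pair touches a different key; the step preserves this key's value
      have hxq : q.1 ≠ x := by
        intro habs
        exact hq1 (habs ▸ List.mem_map_of_mem hmem')
      have hne : PySem.Int.bxor x m ≠ PySem.Int.bxor q.1 m :=
        fun habs => hxq (pvBxor_right_inj habs).symm
      have hpres : (pvStepF m dd q).get? (PySem.Int.bxor x m) = dd.get? (PySem.Int.bxor x m) := by
        unfold pvStepF
        rcases dd.get? (PySem.Int.bxor q.1 m) with _ | v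
        · exact PySem.Dict.get?_insert_of_ne dd _ hne
        · by_cases hlt : q.2 + 1 < v
          · simp only [if_pos hlt]
            exact PySem.Dict.get?_insert_of_ne dd _ hne
          · simp only [if_neg hlt]
      rw [ih _ x w hnd' hmem', hpres]

theorem pvStep_get? (m : Int) (d : PySem.Dict Int Int) (hnd : d.keys.Nodup) (z : Int) :
    (pvStep m d).get? z
      = match d.get? (PySem.Int.bxor z m) with
        | none => d.get? z
        | some w => some (match d.get? z with
                          | none => w + 1
                          | some v => if w + 1 < v then w + 1 else v) := by
  have hmap : (d.items.map Prod.fst).Nodup := by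
    simpa only [PySem.Dict.keys] using hnd
  rw [pvStep_eq_foldF]
  rcases hg : d.get? (PySem.Int.bxor z m) with _ | w
  · apply pvStepF_get?_untouched
    rintro ⟨a, b⟩ hab habs
    have ha : a = PySem.Int.bxor z m := by
      rw [← habs, pvBxor_cancel_right]
    have := PySem.Dict.get?_of_mem_items d hab hnd
    rw [ha, hg] at this
    cases this
  · have hz : PySem.Int.bxor (PySem.Int.bxor z m) m = z := pvBxor_cancel_right z m
    have hmem : (PySem.Int.bxor z m, w) ∈ d.items := PySem.Dict.mem_items_of_get?_eq_some d hg
    have := pvStepF_get?_touched m d.items d (PySem.Int.bxor z m) w hmap hmem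
    rw [hz] at this
    exact this

-- ---- the dict invariant: minimal sub-collection size per reachable XOR value ----
def pvInv (l : List Int) (d : PySem.Dict Int Int) : Prop :=
  d.keys.Nodup ∧ ∀ y : Int,
    ((∃ k, pvSubR l k y) → ∃ K : Nat, d.get? y = some (K : Int) ∧ pvSubR l K y ∧ ∀ j < K, ¬ pvSubR l j y)
    ∧ ((¬ ∃ k, pvSubR l k y) → d.get? y = none)

theorem pvInv_init : pvInv [] (PySem.Dict.ofList [(0, 0)]) := by
  refine ⟨PySem.Dict.nodup_keys_ofList _, fun y => ⟨?_, ?_⟩⟩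
  · rintro ⟨k, hk⟩
    obtain ⟨hk0, hy0⟩ := pvSubR_nil.mp hk
    subst hy0
    exact ⟨0, by decide, pvSubR_nil.mpr ⟨rfl, rfl⟩, fun j hj => absurd hj (by omega)⟩
  · intro h
    have hy : y ≠ 0 := by
      intro habs
      exact h ⟨0, habs ▸ pvSubR_nil.mpr ⟨rfl, rfl⟩⟩
    have he : (PySem.Dict.ofList [((0:Int), (0:Int))]) = PySem.Dict.empty.insert 0 0 := by decide
    rw [he, PySem.Dict.get?_insert_of_ne _ _ hy, PySem.Dict.get?_empty]

theorem pvInv_step (l : List Int) (m : Int) (d : PySem.Dict Int Int)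
    (h : pvInv l d) : pvInv (l ++ [m]) (pvStep m d) := by
  obtain ⟨hnd, hy⟩ := h
  refine ⟨by rw [pvStep_eq_foldF]; exact pvStepF_nodup m d.items d hnd, fun y => ?_⟩
  rw [pvStep_get? m d hnd y]
  by_cases hQ : ∃ k, pvSubR l k (PySem.Int.bxor y m)
  · obtain ⟨K₂, hg2, hK2, hK2min⟩ := (hy (PySem.Int.bxor y m)).1 hQ
    have h2 : ∀ j, pvSubR l j (PySem.Int.bxor y m) → K₂ ≤ j := by
      intro j hj
      by_contra hgt
      exact hK2min j (by omega) hj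
    simp only [hg2]
    by_cases hP : ∃ k, pvSubR l k y
    · obtain ⟨K₁, hg1, hK1, hK1min⟩ := (hy y).1 hP
      have h1 : ∀ j, pvSubR l j y → K₁ ≤ j := by
        intro j hj
        by_contra hgt
        exact hK1min j (by omega) hj
      simp only [hg1]
      constructor
      · intro _
        refine ⟨if K₂ + 1 < K₁ then K₂ + 1 else K₁, ?_, ?_, ?_⟩
        · congr 1
          split_ifs with ha hb hb <;> push_cast <;> omega
        · split_ifs with ha
          · exact pvSubR_concat.mpr (Or.inr ⟨K₂, rfl, hK2⟩)
          · exact pvSubR_concat.mpr (Or.inl hK1)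
        · intro j hj hjr
          rcases pvSubR_concat.mp hjr with hl' | ⟨j', rfl, hj'⟩
          · have := h1 j hl'
            split_ifs at hj <;> omega
          · have := h2 j' hj'
            split_ifs at hj <;> omega
      · intro habs
        exact absurd ⟨K₂ + 1, pvSubR_concat.mpr (Or.inr ⟨K₂, rfl, hK2⟩)⟩ habs
    · have hg1 : d.get? y = none := (hy y).2 hP
      simp only [hg1]
      constructor
      · intro _
        refine ⟨K₂ + 1, by push_cast; rfl, pvSubR_concat.mpr (Or.inr ⟨K₂, rfl, hK2⟩), ?_⟩
        intro j hj hjr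
        rcases pvSubR_concat.mp hjr with hl' | ⟨j', rfl, hj'⟩
        · exact hP ⟨j, hl'⟩
        · have := h2 j' hj'
          omega
      · intro habs
        exact absurd ⟨K₂ + 1, pvSubR_concat.mpr (Or.inr ⟨K₂, rfl, hK2⟩)⟩ habs
  · have hg2 : d.get? (PySem.Int.bxor y m) = none := (hy (PySem.Int.bxor y m)).2 hQ
    simp only [hg2]
    constructor
    · intro hPm
      have hP : ∃ k, pvSubR l k y := by
        obtain ⟨k, hk⟩ := hPm
        rcases pvSubR_concat.mp hk with hl' | ⟨j', _, hj'⟩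
        · exact ⟨k, hl'⟩
        · exact absurd ⟨j', hj'⟩ hQ
      obtain ⟨K₁, hg1, hK1, hK1min⟩ := (hy y).1 hP
      refine ⟨K₁, hg1, pvSubR_concat.mpr (Or.inl hK1), ?_⟩
      intro j hj hjr
      rcases pvSubR_concat.mp hjr with hl' | ⟨j', rfl, hj'⟩
      · exact hK1min j hj hl'
      · exact absurd ⟨j', hj'⟩ hQ
    · intro hno
      apply (hy y).2
      intro ⟨k, hk⟩
      exact hno ⟨k, pvSubR_concat.mpr (Or.inl hk)⟩

theorem pvDP_inv : ∀ (scheds : List (List Int)) (l : List Int) (d : PySem.Dict Int Int),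
    pvInv l d →
    pvInv (l ++ scheds.map pvMaskOf) (scheds.foldl (fun d s => pvStep (pvMaskOf s) d) d) := by
  intro scheds
  induction scheds with
  | nil => intro l d h; simpa using h
  | cons s rest ih =>
    intro l d h
    simp only [List.foldl_cons, List.map_cons]
    have := ih (l ++ [pvMaskOf s]) _ (pvInv_step l (pvMaskOf s) d h)
    simpa [List.append_assoc] using this

theorem pvInv_pvDP (schematics : List (List Int)) :
    pvInv (pvMasks schematics) (pvDP schematics) := by
  have := pvDP_inv schematics [] _ pvInv_init
  rw [pvMasks_eq_map]
  simpa using this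

-- ===== VERDICT (by name: the statement is the Claim_ definition above) =====
theorem solve_diagram_bfs_spec : Claim_equal_solve_diagram_bfs := by
  intro target schematics _ _
  show solve_diagram_bfs target schematics = solve_diagram_bfs_alt target schematics
  unfold solve_diagram_bfs solve_diagram_bfs_alt
  set T := pvTargetMask target with hTdef
  set masks := pvMasks schematics with hmk
  have hlen : masks.length = schematics.length := by
    rw [hmk, pvMasks_eq_map]; simp
  have hnodup : (PySem.Set.ofList [(0 : Int)]).Nodup := by simp [PySem.Set.ofList]
  have hsp0 : ∀ x ∈ PySem.Set.ofList [(0 : Int)], pvSpanned masks x := by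
    intro x hx
    simp [PySem.Set.ofList] at hx
    subst hx
    exact pvSpanned_zero _
  have hmain := pvMain T masks (2 ^ schematics.length + 1) (2 ^ schematics.length + 1)
      [0] (PySem.Set.ofList [0]) 0 hnodup hsp0
      (by intro c hc; simp at hc; subst hc; exact pvSpanned_zero _)
      (by simp [PySem.Set.ofList, hlen])
      (by simp [PySem.Set.ofList, hlen])
  have hmain' : pvLoopA T masks (2 ^ schematics.length + 1) [(0, 0)] (PySem.Set.ofList [0])
      = pvLoopB T masks (2 ^ schematics.length + 1) [0] (PySem.Set.ofList [0]) 0 := by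
    simpa using hmain
  have hV0 : ∀ x, x ∈ PySem.Set.ofList [(0 : Int)] ↔ ∃ k ≤ 0, pvSeqR masks k x := by
    intro x
    constructor
    · intro hx
      have hx0 : x = 0 := by simpa [PySem.Set.ofList] using hx
      exact ⟨0, le_refl _, (pvSeqR_zero _ _).mpr hx0⟩
    · rintro ⟨k, hk, hs⟩
      have hk0 : k = 0 := Nat.le_zero.mp hk
      subst hk0
      have hx0 : x = 0 := (pvSeqR_zero _ _).mp hs
      simp [PySem.Set.ofList, hx0]
  have hF0 : ∀ x, x ∈ [(0 : Int)] ↔ (pvSeqR masks 0 x ∧ ∀ k < 0, ¬ pvSeqR masks k x) := by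
    intro x
    simp only [List.mem_singleton]
    constructor
    · intro hx0
      exact ⟨(pvSeqR_zero _ _).mpr hx0, fun k hk => absurd hk (Nat.not_lt_zero k)⟩
    · rintro ⟨hs, _⟩
      exact (pvSeqR_zero _ _).mp hs
  obtain ⟨hC0, hCK⟩ := pvLoopB_correct T masks (2 ^ schematics.length + 1) [0]
      (PySem.Set.ofList [0]) 0 hV0 hF0 (fun k hk => absurd hk (Nat.not_lt_zero k)) hnodup
      (by simp [PySem.Set.ofList, hlen])
  simp only [Nat.cast_zero] at hC0 hCK
  obtain ⟨hDnd, hDy⟩ := pvInv_pvDP schematics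
  rw [PySem.Dict.getD_eq_get?_getD]
  by_cases hr : ∃ k, pvSeqR masks k T
  · obtain ⟨K, hK, hKmin⟩ := pvExistsMinSeq hr
    have hA := hCK K hK hKmin
    obtain ⟨j, hjle, hsub⟩ := pvSeqR_subR hK
    obtain ⟨K', hg, hK', hK'min⟩ := (hDy T).1 ⟨j, hsub⟩
    have hKK : K' = K := by
      have h1 : K' ≤ j := by
        by_contra hgt
        exact hK'min j (by omega) hsub
      have h2 : K ≤ K' := by
        by_contra hgt
        exact hKmin K' (by omega) (pvSubR_seqR hK')
      omega
    rw [hmain', hA, hg, hKK]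
    rfl
  · have hA := hC0 (fun k hk => hr ⟨k, hk⟩)
    have hnone : (pvDP schematics).get? T = none :=
      (hDy T).2 (fun ⟨k, hk⟩ => hr ⟨k, pvSubR_seqR hk⟩)
    rw [hmain', hA, hnone]
    rfl
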